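-- pv_equiv track=rewrite | github.com/mochita314/grad_thesis | report/report_preprocess.py | make_dct
-- ===== SOURCE A (Python) =====
-- def word_to_number(word):
--     '''
--     change word into number
--     '''
--     number = 0
--     for w in word:
--         number += ord(w)
--     return number
--
-- def h1(key,mod):
--     key = key % mod
--     return key
--
-- def h2(key,mod):
--     key = 1 + key % (mod - 1)
--     return key
--
-- def h(key,i,mod):
--     '''
--     hash function
--     i is the number of times of collision, initiallly set to be 0
--     '''
--     key = h1(key,mod) + i * h2(key,mod)
--     return key
--
-- def found_word(dct,num,word):
--     '''
--     check if the word is already in the dictionary or not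
--     '''
--     for i in range(10**9):
--         key = h(num,i,10**9+7)
--         if dct.get(key) == word:
--             return key,True
--         elif dct.get(key) == None:
--             return key,False
--         else:
--             pass
--
-- def adjust_word(word):
--     '''
--     remove unnecessary symbols from word
--     '''
--     word_lst = []
--     if word[-1] == '.' or word[-1] == ',':
--         '''
--         when symbols are at the end of the word
--         '''
--         if len(word) >= 2:
--             if word[-2] == '.' or word[-2] == ',':
--                 word = word[:-2]
--             else:
--                 word = word[:-1]
--         else:
--             return word_lst
--     elif '.' in word:
--         '''
--         when period is in the middle of the word
--         '''
--         index = word.index('.')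
--         word1 = word[:index]
--         word2 = word[index+1:]
--         word_lst.append(word1)
--         word_lst.append(word2)
--     else:
--         word_lst.append(word)
--     return word_lst
--
-- def make_dct(lst):
--     '''
--     the function to make word dictionary from the list
--     '''
--     dct = {}
--     for i in range(len(lst)):
--         for j in range(len(lst[i])):
--             word = lst[i][j].lower()
--             word_lst = adjust_word(word)
--             for w in word_lst:
--                 num = word_to_number(w)
--                 key,is_found = found_word(dct,num,w)
--                 if not is_found:
--                     dct[key] = w
--     return dct
-- ===== SOURCE B (Python) =====
-- def _pieces(word):
--     # words ending in '.' or ',' contribute nothing (A trims but never appends them);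
--     # a word with an interior '.' splits at its first '.'; otherwise the word itself.
--     if word[-1] == '.' or word[-1] == ',':
--         return []
--     dot = word.find('.')
--     if dot >= 0:
--         return [word[:dot], word[dot + 1:]]
--     return [word]
--
-- def make_dct(lst):
--     M = 10 ** 9 + 7
--     dct = {}
--     placed = set()      # words already stored (a word's probe sequence is fixed, so re-probing is redundant)
--     nxt = {}            # num -> first probe index not known to be occupied
--     occupied = set()    # keys currently in dct
--     for row in lst:
--         for token in row:
--             for w in _pieces(token.lower()):
--                 if w in placed:
--                     continue
--                 num = sum(map(ord, w))
--                 a = num % M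
--                 b = 1 + num % (M - 1)
--                 i = nxt.get(num, 0)
--                 key = a + i * b
--                 while key in occupied:
--                     i += 1
--                     key = a + i * b
--                 dct[key] = w
--                 placed.add(w)
--                 occupied.add(key)
--                 nxt[num] = i + 1
--     return dct
-- ===== Notes on version B (the rewrite author's own statement) =====
-- stated objective: faster
-- what changed: B replaces A's per-word re-probe of the hash table from index 0 (found_word scans the whole collision chain for every occurrence of every word) by a seen-word set for O(1) duplicate detection plus a per-num next-slot counter and an occupied-key set, so each new word is placed with amortized O(1) probing.
-- outside the precondition, e.g. on make_dct([['']]): A raises IndexError, B raises IndexError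
import Mathlib
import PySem

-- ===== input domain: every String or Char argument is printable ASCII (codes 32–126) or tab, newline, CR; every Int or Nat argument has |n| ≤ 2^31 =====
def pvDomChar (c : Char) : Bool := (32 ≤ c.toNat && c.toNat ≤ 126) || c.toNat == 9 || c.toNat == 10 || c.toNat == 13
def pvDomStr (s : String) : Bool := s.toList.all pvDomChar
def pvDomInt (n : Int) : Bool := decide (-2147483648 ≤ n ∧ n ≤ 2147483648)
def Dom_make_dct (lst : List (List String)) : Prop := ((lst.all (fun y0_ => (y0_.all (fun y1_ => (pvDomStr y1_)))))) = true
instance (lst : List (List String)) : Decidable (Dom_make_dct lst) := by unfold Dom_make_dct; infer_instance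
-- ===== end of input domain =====

-- B replaces A's per-word probe of the dict from index 0 by a word→seen set, a per-num next-slot
-- counter and an occupied-key set, so each word is placed with amortized O(1) probing.

-- ===== PORT A =====
def word_to_number (word : String) : Int :=
  word.toList.foldl (fun number w => number + (w.toNat : Int)) 0

def h1 (key mod : Int) : Int := PySem.Int.mod key mod

def h2 (key mod : Int) : Int := 1 + PySem.Int.mod key (mod - 1)

def h (key i mod : Int) : Int := h1 key mod + i * h2 key mod

-- 'for i in range(10**9)' ported as fuel-bounded recursion; returning none = the loop ran out
-- (Python falls off the loop and returns None; make_dct would then raise TypeError).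
def found_word_aux (dct : PySem.Dict Int String) (num : Int) (word : String) (i : Nat) :
    (fuel : Nat) → Option (Int × Bool)
  | 0 => none
  | fuel + 1 =>
    let key := h num (i : Int) (10 ^ 9 + 7)
    match dct.get? key with
    | some v => if v = word then some (key, true) else found_word_aux dct num word (i + 1) fuel
    | none => some (key, false)

def found_word (dct : PySem.Dict Int String) (num : Int) (word : String) : Option (Int × Bool) :=
  found_word_aux dct num word 0 (10 ^ 9)

def adjust_word (word : String) : List String :=
  match PySem.Str.pyGet? word (-1) with
  | none => []  -- Python raises IndexError on word[-1] of the empty word; excluded by Pre_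
  | some c =>
    if c = '.' ∨ c = ',' then
      -- Python trims word here but never appends to word_lst, so both branches return []
      if 2 ≤ PySem.Str.len word then
        let _word := if PySem.Str.pyGet? word (-2) = some '.' ∨ PySem.Str.pyGet? word (-2) = some ','
          then PySem.Str.slice word none (some (-2)) else PySem.Str.slice word none (some (-1))
        ([] : List String)
      else []
    else if PySem.Str.isIn "." word then
      let index := PySem.Str.find word "."  -- word.index('.'); '.' is in word, so index = find
      [PySem.Str.slice word none (some index), PySem.Str.slice word (some (index + 1)) none]
    else [word]

def stepA (dct : PySem.Dict Int String) (w : String) : PySem.Dict Int String :=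
  let num := word_to_number w
  match found_word dct num w with
  | some (key, is_found) => if is_found then dct else dct.insert key w
  | none => dct  -- unreachable under Pre_ (Python raises TypeError unpacking None)

def make_dct (lst : List (List String)) : List (Int × String) :=
  (lst.foldl (fun dct row =>
    row.foldl (fun dct word₀ =>
      (adjust_word (PySem.Str.lower word₀)).foldl stepA dct) dct) PySem.Dict.empty).items

-- ===== PORT B =====
def pieces (word : String) : List String :=
  match PySem.Str.pyGet? word (-1) with
  | none => []  -- empty word: Source B's word[-1] raises IndexError; excluded by Pre_
  | some c =>
    if c = '.' ∨ c = ',' then []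
    else
      let dot := PySem.Str.find word "."
      if 0 ≤ dot then
        [PySem.Str.slice word none (some dot), PySem.Str.slice word (some (dot + 1)) none]
      else [word]

-- Source B's while loop; the fuel |occ|+1 always suffices (the probed keys are pairwise distinct),
-- so the fuel-0 fallback is unreachable.
def probe (occ : PySem.Set Int) (a b i : Int) : (fuel : Nat) → Int × Int
  | 0 => (i, a + i * b)
  | fuel + 1 =>
    let key := a + i * b
    if occ.contains key then probe occ a b (i + 1) fuel else (i, key)

def stepB (st : PySem.Dict Int String × PySem.Set String × PySem.Dict Int Int × PySem.Set Int)
    (w : String) : PySem.Dict Int String × PySem.Set String × PySem.Dict Int Int × PySem.Set Int :=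
  let (dct, placed, nxt, occ) := st
  if placed.contains w then st
  else
    let num : Int := (w.toList.map (fun c => (c.toNat : Int))).sum
    let a := PySem.Int.mod num (10 ^ 9 + 7)
    let b := 1 + PySem.Int.mod num (10 ^ 9 + 6)
    let i0 := nxt.getD num 0
    let res := probe occ a b i0 (occ.length + 1)
    (dct.insert res.2 w, placed.add w, nxt.insert num (res.1 + 1), occ.add res.2)

def make_dct_alt (lst : List (List String)) : List (Int × String) :=
  (lst.foldl (fun st row =>
    row.foldl (fun st tok => (pieces (PySem.Str.lower tok)).foldl stepB st) st)
    (PySem.Dict.empty, ([] : PySem.Set String), PySem.Dict.empty, ([] : PySem.Set Int))).1.items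

-- ===== PRECONDITION & SPEC =====
-- Pre_ excludes (a) lists containing an empty token, on which A's adjust_word raises IndexError,
-- and (b) astronomically large lists (more than 499999999 tokens), where found_word's
-- 10^9-iteration probe loop could exhaust and A would raise TypeError unpacking None.
def Pre_make_dct (lst : List (List String)) : Prop :=
  (∀ row ∈ lst, ∀ w ∈ row, w ≠ "") ∧ (lst.map (·.length)).sum ≤ 499999999

instance (lst : List (List String)) : Decidable (Pre_make_dct lst) := by
  unfold Pre_make_dct; infer_instance

def pvWitness_make_dct : List (List String) := [["Ab", "b.a"], ["cd,", "x", "ba"]]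

def Spec_make_dct (lst : List (List String)) (out : List (Int × String)) : Prop :=
  out = make_dct_alt lst

instance (lst : List (List String)) (out : List (Int × String)) : Decidable (Spec_make_dct lst out) := by
  unfold Spec_make_dct; infer_instance

-- ===== CLAIM (what is proved, stated in full; the proofs are below) =====
def Claim_equal_make_dct : Prop :=
  ∀ (lst : List (List String)), Dom_make_dct lst → Pre_make_dct lst →
    Spec_make_dct lst (make_dct lst)

-- ===== LEMMAS AND PROOFS =====

-- the probe key of word-number num at collision index i
def PKey (num i : Int) : Int := h num i (10 ^ 9 + 7)

-- simulation invariant tying B's state to A's dict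
def SimInv (dct : PySem.Dict Int String) (placed : PySem.Set String)
    (nxt : PySem.Dict Int Int) (occ : PySem.Set Int) : Prop :=
  placed = dct.values ∧
  occ = dct.keys ∧
  dct.keys.Nodup ∧
  dct.values.Nodup ∧
  (∀ num : Int, 0 ≤ nxt.getD num 0) ∧
  (∀ num i : Int, 0 ≤ i → i < nxt.getD num 0 → PKey num i ∈ dct.keys) ∧
  (∀ p ∈ dct.items, ∃ i : Nat, i < dct.items.length ∧ p.1 = PKey (word_to_number p.2) (i : Int) ∧
    ∀ j : Nat, j < i → PKey (word_to_number p.2) (j : Int) ∈ dct.keys)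

lemma adjust_eq_pieces (w : String) : adjust_word w = pieces w := by
  unfold adjust_word pieces
  cases hg : PySem.Str.pyGet? w (-1) with
  | none => rfl
  | some c =>
    simp only []
    by_cases hc : c = '.' ∨ c = ','
    · simp only [if_pos hc]
      split <;> rfl
    · simp only [if_neg hc]
      by_cases hin : ("." : String).toList <:+: w.toList
      · rw [if_pos ((PySem.Str.isIn_iff_infix _ _).2 hin),
            if_pos ((PySem.Str.find_nonneg_iff _ _).2 hin)]
      · rw [if_neg (fun h => hin ((PySem.Str.isIn_iff_infix _ _).1 h)),
            if_neg (fun h => hin ((PySem.Str.find_nonneg_iff _ _).1 h))]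

lemma wtn_eq_sum (w : String) :
    (w.toList.map (fun c => (c.toNat : Int))).sum = word_to_number w := by
  unfold word_to_number
  rw [PySem.List.foldl_add w.toList (fun c => (c.toNat : Int)) 0, zero_add]

lemma PKey_eq (num i : Int) :
    PKey num i = PySem.Int.mod num (10 ^ 9 + 7) + i * (1 + PySem.Int.mod num (10 ^ 9 + 6)) := by
  unfold PKey h h1 h2
  norm_num

lemma PKey_strictMono (num : Int) {i j : Int} (hij : i < j) : PKey num i < PKey num j := by
  have hb : 0 ≤ PySem.Int.mod num (10 ^ 9 + 7 - 1) := PySem.Int.mod_nonneg _ (by norm_num)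
  unfold PKey h h1 h2
  nlinarith

lemma found_word_aux_spec (dct : PySem.Dict Int String) (num : Int) (w : String)
    (fuel : Nat) (i0 i : Nat) (hle : i0 ≤ i) (hfuel : i - i0 < fuel)
    (hmiss : ∀ j : Nat, i0 ≤ j → j < i → ∃ v, dct.get? (PKey num (j : Int)) = some v ∧ v ≠ w)
    (hhit : dct.get? (PKey num (i : Int)) = some w ∨ dct.get? (PKey num (i : Int)) = none) :
    found_word_aux dct num w i0 fuel =
      some (PKey num (i : Int), (dct.get? (PKey num (i : Int))).isSome) := by
  induction fuel generalizing i0 with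
  | zero => omega
  | succ fuel ih =>
    rw [found_word_aux]
    rcases eq_or_lt_of_le hle with rfl | hlt
    · rcases hhit with hh | hh
      · rw [show h num (i0 : Int) (10 ^ 9 + 7) = PKey num (i0 : Int) from rfl, hh]
        simp
      · rw [show h num (i0 : Int) (10 ^ 9 + 7) = PKey num (i0 : Int) from rfl, hh]
        simp
    · obtain ⟨v, hv, hne⟩ := hmiss i0 le_rfl hlt
      rw [show h num (i0 : Int) (10 ^ 9 + 7) = PKey num (i0 : Int) from rfl, hv]
      simp only [if_neg hne]
      exact ih (i0 + 1) (by omega) (by omega) (fun j h1 h2 => hmiss j (by omega) h2)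

lemma probe_spec (occ : PySem.Set Int) (num : Int) (fuel : Nat) (i0 tgt : Int)
    (hle : i0 ≤ tgt) (hfuel : (tgt - i0).toNat < fuel)
    (hmiss : ∀ j : Int, i0 ≤ j → j < tgt → occ.contains (PKey num j) = true)
    (hfree : occ.contains (PKey num tgt) = false) :
    probe occ (PySem.Int.mod num (10 ^ 9 + 7)) (1 + PySem.Int.mod num (10 ^ 9 + 6)) i0 fuel =
      (tgt, PKey num tgt) := by
  induction fuel generalizing i0 with
  | zero => omega
  | succ fuel ih =>
    rw [probe]
    rcases eq_or_lt_of_le hle with rfl | hlt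
    · rw [show PySem.Int.mod num (10 ^ 9 + 7) + i0 * (1 + PySem.Int.mod num (10 ^ 9 + 6))
            = PKey num i0 from (PKey_eq num i0).symm, hfree]
      simp
    · rw [show PySem.Int.mod num (10 ^ 9 + 7) + i0 * (1 + PySem.Int.mod num (10 ^ 9 + 6))
            = PKey num i0 from (PKey_eq num i0).symm, hmiss i0 le_rfl hlt]
      simp only [if_true]
      exact ih (i0 + 1) (by omega) (by omega) (fun j h1 h2 => hmiss j (by omega) h2)

lemma mem_items_get? {dct : PySem.Dict Int String} (hnd : dct.keys.Nodup)
    {k : Int} {v : String} (hm : (k, v) ∈ dct.items) : dct.get? k = some v := by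
  have hsome : (dct.items.find? (fun p => p.1 == k)).isSome := by
    exact List.find?_isSome.2 ⟨(k, v), hm, by simp⟩
  obtain ⟨q, hq⟩ := Option.isSome_iff_exists.1 hsome
  have hqmem : q ∈ dct.items := List.mem_of_find?_eq_some hq
  have hqk : q.1 = k := by simpa using List.find?_some hq
  have hqeq : q = (k, v) := by
    exact List.inj_on_of_nodup_map (f := Prod.fst) hnd hqmem hm (by simpa using hqk)
  simp [PySem.Dict.get?, hq, hqeq]

lemma get?_mem_items {dct : PySem.Dict Int String} {k : Int} {v : String}
    (hg : dct.get? k = some v) : (k, v) ∈ dct.items := by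
  unfold PySem.Dict.get? at hg
  obtain ⟨q, hq, hqv⟩ := Option.map_eq_some_iff.1 hg
  have hqmem : q ∈ dct.items := List.mem_of_find?_eq_some hq
  have hqk : q.1 = k := by simpa using List.find?_some hq
  have : q = (k, v) := by
    cases q; simp_all
  exact this ▸ hqmem

lemma mem_keys_get? {dct : PySem.Dict Int String} {k : Int} (hk : k ∈ dct.keys) :
    ∃ v, dct.get? k = some v := by
  obtain ⟨p, hp, hpk⟩ := List.mem_map.1 hk
  have hsome : (dct.items.find? (fun q => q.1 == k)).isSome := by
    exact List.find?_isSome.2 ⟨p, hp, by simp [hpk]⟩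
  obtain ⟨q, hq⟩ := Option.isSome_iff_exists.1 hsome
  exact ⟨q.2, by simp [PySem.Dict.get?, hq]⟩

lemma get?_none_of_not_mem {dct : PySem.Dict Int String} {k : Int} (hk : k ∉ dct.keys) :
    dct.get? k = none := by
  unfold PySem.Dict.get?
  rw [List.find?_eq_none.2]
  · rfl
  · intro p hp hpk
    exact hk (List.mem_map.2 ⟨p, hp, by simpa using hpk⟩)

lemma insert_fresh_items {dct : PySem.Dict Int String} {k : Int} (v : String)
    (hk : k ∉ dct.keys) : (dct.insert k v).items = dct.items ++ [(k, v)] := by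
  have hc : dct.contains k = false := by
    rw [PySem.Dict.contains, List.any_eq_false]
    intro p hp hpk
    exact hk (List.mem_map.2 ⟨p, hp, by simpa using hpk⟩)
  simp [PySem.Dict.insert, hc]

-- there is a free probe index no larger than the number of stored keys
lemma exists_free (dct : PySem.Dict Int String) (num : Int) :
    ∃ n : Nat, n ≤ dct.keys.length ∧ PKey num (n : Int) ∉ dct.keys := by
  by_contra hcon
  push Not at hcon
  set L := dct.keys.length with hL
  have hnodup : ((List.range (L + 1)).map (fun n : Nat => PKey num (n : Int))).Nodup := by
    rw [List.nodup_map_iff_inj_on List.nodup_range]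
    intro a ha b hb hab
    by_contra hne
    rcases Nat.lt_or_ge a b with hlt | hge
    · exact absurd hab (ne_of_lt (PKey_strictMono num (by exact_mod_cast hlt)))
    · have hlt : b < a := lt_of_le_of_ne hge (fun e => hne e.symm)
      exact absurd hab.symm (ne_of_lt (PKey_strictMono num (by exact_mod_cast hlt)))
  have hsub : ((List.range (L + 1)).map (fun n : Nat => PKey num (n : Int))) ⊆ dct.keys := by
    intro x hx
    obtain ⟨n, hn, rfl⟩ := List.mem_map.1 hx
    exact hcon n (by have := List.mem_range.1 hn; omega)
  have hle : ((List.range (L + 1)).map (fun n : Nat => PKey num (n : Int))).length ≤ L := by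
    calc ((List.range (L + 1)).map (fun n : Nat => PKey num (n : Int))).length
        = ((List.range (L + 1)).map (fun n : Nat => PKey num (n : Int))).toFinset.card :=
          (List.toFinset_card_of_nodup hnodup).symm
    _ ≤ dct.keys.toFinset.card := Finset.card_le_card (by
        intro x hx; rw [List.mem_toFinset] at hx ⊢; exact hsub hx)
    _ ≤ dct.keys.length := List.toFinset_card_le _
  simp at hle

lemma step_sim (dct : PySem.Dict Int String) (placed : PySem.Set String)
    (nxt : PySem.Dict Int Int) (occ : PySem.Set Int) (w : String)
    (hInv : SimInv dct placed nxt occ) (hlen : dct.items.length < 10 ^ 9) :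
    ∃ placed' nxt' occ',
      stepB (dct, placed, nxt, occ) w = (stepA dct w, placed', nxt', occ') ∧
      SimInv (stepA dct w) placed' nxt' occ' ∧
      (stepA dct w).items.length ≤ dct.items.length + 1 := by
  obtain ⟨hp, ho, hknd, hvnd, hnn, hcnt, hwit⟩ := hInv
  have hkl : dct.keys.length = dct.items.length := by simp [PySem.Dict.keys]
  by_cases hw : w ∈ dct.values
  · -- the word is already placed: both sides leave the state unchanged
    have hpc : placed.contains w = true := by
      rw [hp]; exact List.contains_iff_mem.2 hw
    have hB : stepB (dct, placed, nxt, occ) w = (dct, placed, nxt, occ) := by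
      simp only [stepB, hpc]
      simp
    obtain ⟨p, hpmem, hpw⟩ := List.mem_map.1 hw
    obtain ⟨i, hil, hik, hprev⟩ := hwit p hpmem
    rw [hpw] at hik hprev
    set num := word_to_number w with hnum
    have hhit : dct.get? (PKey num (i : Int)) = some w := by
      rw [← hik]
      have : p = (p.1, w) := by rw [← hpw]
      exact mem_items_get? hknd (by rw [← this]; exact hpmem)
    have hmiss : ∀ j : Nat, 0 ≤ j → j < i →
        ∃ v, dct.get? (PKey num (j : Int)) = some v ∧ v ≠ w := by
      intro j _ hj
      obtain ⟨v, hv⟩ := mem_keys_get? (hprev j hj)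
      refine ⟨v, hv, fun hvw => ?_⟩
      subst hvw
      have hmem2 : (PKey num (j : Int), v) ∈ dct.items := get?_mem_items hv
      have heq : (PKey num (j : Int), v) = p := by
        refine List.inj_on_of_nodup_map (f := Prod.snd) hvnd hmem2 hpmem ?_
        simp [hpw]
      have : PKey num (j : Int) = PKey num (i : Int) := by
        rw [← hik]; exact congrArg Prod.fst heq
      exact absurd this (ne_of_lt (PKey_strictMono num (by exact_mod_cast hj)))
    have hfw : found_word dct num w = some (PKey num (i : Int), true) := by
      have := found_word_aux_spec dct num w (10 ^ 9) 0 i (Nat.zero_le _)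
        (by omega) (fun j h1 h2 => hmiss j h1 h2) (Or.inl hhit)
      rw [found_word, this, hhit]
      rfl
    have hA : stepA dct w = dct := by
      simp [stepA, ← hnum, hfw]
    refine ⟨placed, nxt, occ, by rw [hB, hA], ?_, by rw [hA]; omega⟩
    rw [hA]
    exact ⟨hp, ho, hknd, hvnd, hnn, hcnt, hwit⟩
  · -- new word: both sides insert it at the first free probe slot
    have hpc : placed.contains w = false := by
      rw [hp]
      exact Bool.eq_false_iff.2 (fun hh => hw (List.contains_iff_mem.1 hh))
    set num := word_to_number w with hnum
    have hex : ∃ m : Nat, PKey num (m : Int) ∉ dct.keys := by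
      obtain ⟨n, _, hn⟩ := exists_free dct num
      exact ⟨n, hn⟩
    set i := Nat.find hex with hi
    have hfree : PKey num (i : Int) ∉ dct.keys := Nat.find_spec hex
    have hmin : ∀ j : Nat, j < i → PKey num (j : Int) ∈ dct.keys := by
      intro j hj
      exact not_not.1 (Nat.find_min hex hj)
    have hiL : i ≤ dct.keys.length := by
      obtain ⟨n, hnle, hn⟩ := exists_free dct num
      exact le_trans (Nat.find_min' hex hn) hnle
    -- A side
    have hfw : found_word dct num w = some (PKey num (i : Int), false) := by
      have hhit : dct.get? (PKey num (i : Int)) = none := get?_none_of_not_mem hfree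
      have := found_word_aux_spec dct num w (10 ^ 9) 0 i (Nat.zero_le _)
        (by omega)
        (fun j _ hj => by
          obtain ⟨v, hv⟩ := mem_keys_get? (hmin j hj)
          refine ⟨v, hv, fun hvw => ?_⟩
          subst hvw
          exact hw (List.mem_map.2 ⟨_, get?_mem_items hv, rfl⟩))
        (Or.inr hhit)
      rw [found_word, this, hhit]
      rfl
    have hA : stepA dct w = dct.insert (PKey num (i : Int)) w := by
      simp [stepA, ← hnum, hfw]
    -- B side
    have h0 : (0 : Int) ≤ nxt.getD num 0 := hnn num
    have hi0le : nxt.getD num 0 ≤ (i : Int) := by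
      by_contra hcon
      push Not at hcon
      have h0i : (0 : Int) ≤ (i : Int) := by exact_mod_cast Nat.zero_le i
      exact hfree (hcnt num (i : Int) h0i hcon)
    have hprobe : probe occ (PySem.Int.mod num (10 ^ 9 + 7))
        (1 + PySem.Int.mod num (10 ^ 9 + 6)) (nxt.getD num 0) (occ.length + 1) =
        ((i : Int), PKey num (i : Int)) := by
      refine probe_spec occ num (occ.length + 1) (nxt.getD num 0) (i : Int) hi0le ?_ ?_ ?_
      · have hoL : occ.length = dct.keys.length := by rw [ho]
        omega
      · intro j hj1 hj2
        have hj0 : (0 : Int) ≤ j := le_trans h0 hj1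
        have hjn : j = ((j.toNat : Nat) : Int) := by omega
        have hjlt : j.toNat < i := by omega
        rw [ho]
        exact List.contains_iff_mem.2 (by rw [hjn]; exact hmin j.toNat hjlt)
      · rw [ho]
        exact Bool.eq_false_iff.2 (fun hh => hfree (List.contains_iff_mem.1 hh))
    have hB : stepB (dct, placed, nxt, occ) w =
        (dct.insert (PKey num (i : Int)) w, placed.add w,
         nxt.insert num ((i : Int) + 1), occ.add (PKey num (i : Int))) := by
      simp only [stepB, hpc, Bool.false_eq_true, if_false, wtn_eq_sum, ← hnum, hprobe]
    -- the new state satisfies the invariant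
    have hitems' : (dct.insert (PKey num (i : Int)) w).items =
        dct.items ++ [(PKey num (i : Int), w)] := insert_fresh_items w hfree
    have hkeys' : (dct.insert (PKey num (i : Int)) w).keys =
        dct.keys ++ [PKey num (i : Int)] := by
      simp [PySem.Dict.keys, hitems']
    have hvals' : (dct.insert (PKey num (i : Int)) w).values =
        dct.values ++ [w] := by
      simp [PySem.Dict.values, hitems']
    refine ⟨placed.add w, nxt.insert num ((i : Int) + 1), occ.add (PKey num (i : Int)),
      by rw [hB, hA], ?_, by rw [hA]; simp [hitems']⟩
    rw [hA]
    refine ⟨?_, ?_, ?_, ?_, ?_, ?_, ?_⟩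
    · rw [hvals', ← hp, PySem.Set.add, hpc]
      simp
    · have hoc : occ.contains (PKey num (i : Int)) = false := by
        rw [ho]
        exact Bool.eq_false_iff.2 (fun hh => hfree (List.contains_iff_mem.1 hh))
      rw [hkeys', ← ho, PySem.Set.add, hoc]
      simp
    · rw [hkeys']
      simp only [List.nodup_append, List.nodup_singleton, true_and]
      refine ⟨hknd, ?_⟩
      intro a ha b hb
      simp only [List.mem_singleton] at hb
      subst hb
      exact fun he => hfree (he ▸ ha)
    · rw [hvals']
      simp only [List.nodup_append, List.nodup_singleton, true_and]
      refine ⟨hvnd, ?_⟩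
      intro a ha b hb
      simp only [List.mem_singleton] at hb
      subst hb
      exact fun he => hw (he ▸ ha)
    · intro num'
      rw [PySem.Dict.getD_insert]
      split
      · positivity
      · exact hnn num'
    · intro num' i' h0' hlt
      rw [PySem.Dict.getD_insert] at hlt
      rw [hkeys']
      by_cases hne : num' = num
      · subst hne
        rw [if_pos rfl] at hlt
        have hin : i'.toNat ≤ i := by omega
        have hicast : i' = ((i'.toNat : Nat) : Int) := by omega
        rcases Nat.lt_or_ge i'.toNat i with hlt2 | hge
        · exact List.mem_append_left _ (by rw [hicast]; exact hmin i'.toNat hlt2)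
        · have : i'.toNat = i := by omega
          rw [hicast, this]
          simp
      · rw [if_neg hne] at hlt
        exact List.mem_append_left _ (hcnt num' i' h0' hlt)
    · intro p hpmem
      rw [hitems'] at hpmem
      rcases List.mem_append.1 hpmem with hpold | hpnew
      · obtain ⟨ip, hipl, hipk, hipprev⟩ := hwit p hpold
        refine ⟨ip, by simp [hitems']; omega, hipk, fun j hj => ?_⟩
        rw [hkeys']
        exact List.mem_append_left _ (hipprev j hj)
      · have hpeq : p = (PKey num (i : Int), w) := by simpa using hpnew
        subst hpeq
        refine ⟨i, by simp [hitems']; omega, by rw [hnum], fun j hj => ?_⟩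
        rw [hkeys', hnum]
        exact List.mem_append_left _ (hmin j hj)

lemma run_sim (ws : List String) (dct : PySem.Dict Int String) (placed : PySem.Set String)
    (nxt : PySem.Dict Int Int) (occ : PySem.Set Int)
    (hInv : SimInv dct placed nxt occ) (hlen : dct.items.length + ws.length ≤ 10 ^ 9) :
    (ws.foldl stepB (dct, placed, nxt, occ)).1 = ws.foldl stepA dct := by
  induction ws generalizing dct placed nxt occ with
  | nil => rfl
  | cons w ws ih =>
    simp only [List.foldl_cons]
    obtain ⟨p', n', o', hB, hI, hL⟩ := step_sim dct placed nxt occ w hInv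
      (by simp only [List.length_cons] at hlen; omega)
    rw [hB]
    exact ih _ _ _ _ hI (by simp only [List.length_cons] at hlen; omega)

lemma adjust_len (w : String) : (adjust_word w).length ≤ 2 := by
  unfold adjust_word
  cases PySem.Str.pyGet? w (-1) with
  | none => simp
  | some c =>
    by_cases hc : c = '.' ∨ c = ','
    · simp only [if_pos hc]
      split_ifs <;> simp
    · simp only [if_neg hc]
      split_ifs <;> simp

lemma row_len (row : List String) :
    (row.flatMap (fun tok => adjust_word (PySem.Str.lower tok))).length ≤ 2 * row.length := by
  induction row with
  | nil => simp
  | cons tok t ih =>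
    simp only [List.flatMap_cons, List.length_append, List.length_cons]
    have := adjust_len (PySem.Str.lower tok)
    omega

lemma ws_len (lst : List (List String)) :
    (lst.flatMap (fun row => row.flatMap (fun tok => adjust_word (PySem.Str.lower tok)))).length ≤
      2 * (lst.map (·.length)).sum := by
  induction lst with
  | nil => simp
  | cons row t ih =>
    simp only [List.flatMap_cons, List.length_append, List.map_cons, List.sum_cons]
    have := row_len row
    omega

lemma simInv_empty :
    SimInv PySem.Dict.empty ([] : PySem.Set String) PySem.Dict.empty ([] : PySem.Set Int) := by
  refine ⟨rfl, rfl, List.nodup_nil, List.nodup_nil, ?_, ?_, ?_⟩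
  · intro num
    simp [PySem.Dict.getD, PySem.Dict.get?, PySem.Dict.empty]
  · intro num i h0 hlt
    simp [PySem.Dict.getD, PySem.Dict.get?, PySem.Dict.empty] at hlt
    omega
  · intro p hp
    simp [PySem.Dict.empty] at hp

-- ===== VERDICT (by name: the statement is the Claim_ definition above) =====
theorem make_dct_spec : Claim_equal_make_dct := by
  intro lst _hdom hpre
  unfold Spec_make_dct
  have hA : make_dct lst =
      ((lst.flatMap (fun row => row.flatMap (fun tok => adjust_word (PySem.Str.lower tok)))).foldl
        stepA PySem.Dict.empty).items := by
    unfold make_dct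
    simp only [List.foldl_flatMap]
  have hBfold : make_dct_alt lst =
      ((lst.flatMap (fun row => row.flatMap (fun tok => adjust_word (PySem.Str.lower tok)))).foldl
        stepB (PySem.Dict.empty, ([] : PySem.Set String), PySem.Dict.empty,
          ([] : PySem.Set Int))).1.items := by
    unfold make_dct_alt
    simp only [adjust_eq_pieces, List.foldl_flatMap]
  rw [hA, hBfold]
  congr 1
  refine (run_sim _ _ _ _ _ simInv_empty ?_).symm
  have h1 := ws_len lst
  have h2 := hpre.2
  simp only [PySem.Dict.empty, List.length_nil]
  omega
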